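-- pv_equiv track=rewrite | github.com/tilde-lab/ml-playground | descriptors/seebeck_coefficient/graph_from_structure.py | atom_to_one_hot
-- ===== SOURCE A (Python) =====
-- def atom_to_one_hot(atom):
--     '''
--     Makes one-hot vector for specific atom.
--     '''
--     atoms = ['H', 'He', 'Li', 'Be', 'B', 'C', 'N', 'O', 'F', 'Ne', 'Na', 'Mg', 'Al', 'Si', 'P', 'S', 'Cl', 'Ar',
--              'K', 'Ca', 'Sc', 'Ti', 'V', 'Cr', 'Mn', 'Fe', 'Co', 'Ni', 'Cu', 'Zn', 'Ga', 'Ge', 'As', 'Se', 'Br',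
--              'Kr',
--              'Rb', 'Sr', 'Y', 'Zr', 'Nb', 'Mo', 'Tc', 'Ru', 'Rh', 'Pd', 'Ag', 'Cd', 'In', 'Sn', 'Sb', 'Te', 'I',
--              'Xe',
--              'Cs', 'Ba', 'La', 'Ce', 'Pr', 'Nd', 'Pm', 'Sm', 'Eu', 'Gd', 'Tb', 'Dy', 'Ho', 'Er', 'Tm', 'Yb', 'Lu',
--              'Hf',
--              'Ta', 'W', 'Re', 'Os', 'Ir', 'Pt', 'Au', 'Hg', 'Tl', 'Pb', 'Bi', 'Po', 'At', 'Rn', 'Fr', 'Ra', 'Ac',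
--              'Th',
--              'Pa', 'U', 'Np', 'Pu', 'Am', 'Cm', 'Bk', 'Cf', 'Es', 'Fm', 'Md', 'No', 'Lr', 'Rf', 'Db', 'Sg', 'Bh',
--              'Hs',
--              'Mt', 'Ds', 'Rg', 'Cn', 'Nh', 'Fl', 'Mc', 'Lv', 'Ts', 'Og']
--
--     one_hot = [1 if atom == a else 0 for a in atoms]
--     return one_hot
-- ===== SOURCE B (Python) =====
-- # Alphabetically sorted (symbol, atomic-index) table, so the symbol can be
-- # located by binary search; indices refer to positions in the standard
-- # H..Og element order (0-based).
-- _TABLE = [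
--     ('Ac', 88), ('Ag', 46), ('Al', 12), ('Am', 94), ('Ar', 17), ('As', 32), ('At', 84), ('Au', 78),
--     ('B', 4), ('Ba', 55), ('Be', 3), ('Bh', 106), ('Bi', 82), ('Bk', 96), ('Br', 34), ('C', 5),
--     ('Ca', 19), ('Cd', 47), ('Ce', 57), ('Cf', 97), ('Cl', 16), ('Cm', 95), ('Cn', 111), ('Co', 26),
--     ('Cr', 23), ('Cs', 54), ('Cu', 28), ('Db', 104), ('Ds', 109), ('Dy', 65), ('Er', 67), ('Es', 98),
--     ('Eu', 62), ('F', 8), ('Fe', 25), ('Fl', 113), ('Fm', 99), ('Fr', 86), ('Ga', 30), ('Gd', 63),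
--     ('Ge', 31), ('H', 0), ('He', 1), ('Hf', 71), ('Hg', 79), ('Ho', 66), ('Hs', 107), ('I', 52),
--     ('In', 48), ('Ir', 76), ('K', 18), ('Kr', 35), ('La', 56), ('Li', 2), ('Lr', 102), ('Lu', 70),
--     ('Lv', 115), ('Mc', 114), ('Md', 100), ('Mg', 11), ('Mn', 24), ('Mo', 41), ('Mt', 108), ('N', 6),
--     ('Na', 10), ('Nb', 40), ('Nd', 59), ('Ne', 9), ('Nh', 112), ('Ni', 27), ('No', 101), ('Np', 92),
--     ('O', 7), ('Og', 117), ('Os', 75), ('P', 14), ('Pa', 90), ('Pb', 81), ('Pd', 45), ('Pm', 60),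
--     ('Po', 83), ('Pr', 58), ('Pt', 77), ('Pu', 93), ('Ra', 87), ('Rb', 36), ('Re', 74), ('Rf', 103),
--     ('Rg', 110), ('Rh', 44), ('Rn', 85), ('Ru', 43), ('S', 15), ('Sb', 50), ('Sc', 20), ('Se', 33),
--     ('Sg', 105), ('Si', 13), ('Sm', 61), ('Sn', 49), ('Sr', 37), ('Ta', 72), ('Tb', 64), ('Tc', 42),
--     ('Te', 51), ('Th', 89), ('Ti', 21), ('Tl', 80), ('Tm', 68), ('Ts', 116), ('U', 91), ('V', 22),
--     ('W', 73), ('Xe', 53), ('Y', 38), ('Yb', 69), ('Zn', 29), ('Zr', 39),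
-- ]
--
--
-- def atom_to_one_hot(atom):
--     '''
--     Makes one-hot vector for specific atom: binary-search the sorted symbol
--     table for the atom, then write a single 1 at its atomic index
--     (unknown symbols fall out of the search and leave the vector all zeros).
--     '''
--     one_hot = [0] * 118
--     lo, hi = 0, len(_TABLE)
--     while lo < hi:
--         mid = (lo + hi) // 2
--         s, i = _TABLE[mid]
--         if atom < s:
--             hi = mid
--         elif s < atom:
--             lo = mid + 1
--         else:
--             one_hot[i] = 1
--             break
--     return one_hot
-- ===== Notes on version B (the rewrite author's own statement) =====
-- stated objective: alternative
-- what changed: A scans all 118 symbols emitting a 1/0 per equality comparison; B builds (once, at module load) a table of (symbol, original index) pairs sorted by symbol, binary-searches it for the atom in at most 7 string comparisons, and writes a single 1 into a zero vector at the found index (unknown symbols fall out of the search and leave the vector all zeros).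
import Mathlib
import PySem

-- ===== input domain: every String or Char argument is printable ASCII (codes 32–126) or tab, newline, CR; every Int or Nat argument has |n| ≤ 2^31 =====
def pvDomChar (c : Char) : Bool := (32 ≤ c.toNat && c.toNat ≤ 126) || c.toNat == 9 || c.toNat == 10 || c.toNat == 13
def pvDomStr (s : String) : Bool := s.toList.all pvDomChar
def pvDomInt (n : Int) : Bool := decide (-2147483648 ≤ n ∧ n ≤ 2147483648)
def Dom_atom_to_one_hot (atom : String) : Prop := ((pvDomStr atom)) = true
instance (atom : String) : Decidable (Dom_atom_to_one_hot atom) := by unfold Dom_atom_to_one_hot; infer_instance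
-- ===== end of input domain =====

-- B replaces A's 118-way comparison scan by a binary search over a sorted (symbol, index)
-- table followed by a single write into a zero vector; same value on every input.

-- ===== PORT A =====
-- the element-symbol list local to A
def pvAtoms : List String :=
  ["H", "He", "Li", "Be", "B", "C", "N", "O", "F", "Ne", "Na", "Mg", "Al", "Si", "P", "S", "Cl", "Ar",
   "K", "Ca", "Sc", "Ti", "V", "Cr", "Mn", "Fe", "Co", "Ni", "Cu", "Zn", "Ga", "Ge", "As", "Se", "Br",
   "Kr",
   "Rb", "Sr", "Y", "Zr", "Nb", "Mo", "Tc", "Ru", "Rh", "Pd", "Ag", "Cd", "In", "Sn", "Sb", "Te", "I",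
   "Xe",
   "Cs", "Ba", "La", "Ce", "Pr", "Nd", "Pm", "Sm", "Eu", "Gd", "Tb", "Dy", "Ho", "Er", "Tm", "Yb", "Lu",
   "Hf",
   "Ta", "W", "Re", "Os", "Ir", "Pt", "Au", "Hg", "Tl", "Pb", "Bi", "Po", "At", "Rn", "Fr", "Ra", "Ac",
   "Th",
   "Pa", "U", "Np", "Pu", "Am", "Cm", "Bk", "Cf", "Es", "Fm", "Md", "No", "Lr", "Rf", "Db", "Sg", "Bh",
   "Hs",
   "Mt", "Ds", "Rg", "Cn", "Nh", "Fl", "Mc", "Lv", "Ts", "Og"]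

-- one_hot = [1 if atom == a else 0 for a in atoms]
def atom_to_one_hot (atom : String) : List Int :=
  pvAtoms.map (fun a => if atom == a then (1 : Int) else 0)

-- ===== PORT B =====
-- Source B's module-level _TABLE: (symbol, atomic index) pairs, sorted alphabetically by symbol
def pvTable : List (String × Int) :=
[
   ("Ac", 88), ("Ag", 46), ("Al", 12), ("Am", 94), ("Ar", 17), ("As", 32), ("At", 84), ("Au", 78),
   ("B", 4), ("Ba", 55), ("Be", 3), ("Bh", 106), ("Bi", 82), ("Bk", 96), ("Br", 34), ("C", 5),
   ("Ca", 19), ("Cd", 47), ("Ce", 57), ("Cf", 97), ("Cl", 16), ("Cm", 95), ("Cn", 111), ("Co", 26),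
   ("Cr", 23), ("Cs", 54), ("Cu", 28), ("Db", 104), ("Ds", 109), ("Dy", 65), ("Er", 67), ("Es", 98),
   ("Eu", 62), ("F", 8), ("Fe", 25), ("Fl", 113), ("Fm", 99), ("Fr", 86), ("Ga", 30), ("Gd", 63),
   ("Ge", 31), ("H", 0), ("He", 1), ("Hf", 71), ("Hg", 79), ("Ho", 66), ("Hs", 107), ("I", 52),
   ("In", 48), ("Ir", 76), ("K", 18), ("Kr", 35), ("La", 56), ("Li", 2), ("Lr", 102), ("Lu", 70),
   ("Lv", 115), ("Mc", 114), ("Md", 100), ("Mg", 11), ("Mn", 24), ("Mo", 41), ("Mt", 108), ("N", 6),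
   ("Na", 10), ("Nb", 40), ("Nd", 59), ("Ne", 9), ("Nh", 112), ("Ni", 27), ("No", 101), ("Np", 92),
   ("O", 7), ("Og", 117), ("Os", 75), ("P", 14), ("Pa", 90), ("Pb", 81), ("Pd", 45), ("Pm", 60),
   ("Po", 83), ("Pr", 58), ("Pt", 77), ("Pu", 93), ("Ra", 87), ("Rb", 36), ("Re", 74), ("Rf", 103),
   ("Rg", 110), ("Rh", 44), ("Rn", 85), ("Ru", 43), ("S", 15), ("Sb", 50), ("Sc", 20), ("Se", 33),
   ("Sg", 105), ("Si", 13), ("Sm", 61), ("Sn", 49), ("Sr", 37), ("Ta", 72), ("Tb", 64), ("Tc", 42),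
   ("Te", 51), ("Th", 89), ("Ti", 21), ("Tl", 80), ("Tm", 68), ("Ts", 116), ("U", 91), ("V", 22),
   ("W", 73), ("Xe", 53), ("Y", 38), ("Yb", 69), ("Zn", 29), ("Zr", 39)]

-- the while lo < hi loop of Source B, as a structural recursion on a fuel counter that
-- bounds the number of remaining iterations (hi - lo shrinks every step); Python's
-- '<' on str is exactly Lean's '<' on String.toList (code-point lexicographic), and
-- (lo + hi) / 2 on Nat is exactly Python's (lo + hi) // 2 on these nonnegative ints
def pvSearchGo (atom : String) (fuel lo hi : Nat) : Option Int :=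
  match fuel with
  | 0 => none
  | fuel + 1 =>
    if lo < hi then
      match pvTable[(lo + hi) / 2]? with
      | none => none          -- unreachable: mid < hi ≤ len(_TABLE)
      | some p =>
        if atom.toList < p.1.toList then pvSearchGo atom fuel lo ((lo + hi) / 2)
        else if p.1.toList < atom.toList then pvSearchGo atom fuel ((lo + hi) / 2 + 1) hi
        else some p.2         -- found: break with index p.2
    else none

def pvSearch (atom : String) (lo hi : Nat) : Option Int :=
  pvSearchGo atom (hi - lo) lo hi

-- one_hot = [0]*118; binary search; one_hot[i] = 1 on a hit
def atom_to_one_hot_alt (atom : String) : List Int :=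
  let one_hot := List.replicate 118 (0 : Int)
  match pvSearch atom 0 pvTable.length with
  | some i => PySem.List.pySetD one_hot i 1
  | none => one_hot

-- ===== PRECONDITION & SPEC =====
def Spec_atom_to_one_hot (atom : String) (out : List Int) : Prop := out = atom_to_one_hot_alt atom
instance (atom : String) (out : List Int) : Decidable (Spec_atom_to_one_hot atom out) := by unfold Spec_atom_to_one_hot; infer_instance

-- ===== CLAIM (what is proved, stated in full; the proofs are below) =====
def Claim_equal_atom_to_one_hot : Prop := ∀ (atom : String), Dom_atom_to_one_hot atom → Spec_atom_to_one_hot atom (atom_to_one_hot atom)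

-- ===== LEMMAS AND PROOFS =====

-- facts about the fixed table, checked by evaluation; stated over adjacent pairs and
-- direct indexing (no quadratic scans) to keep kernel checking cheap

-- symbols strictly increase along the table
set_option maxRecDepth 40000 in
theorem pvTable_chain : List.IsChain (fun p q : String × Int => p.1.toList < q.1.toList) pvTable := by decide

theorem pvTable_sorted : pvTable.Pairwise (fun p q => p.1.toList < q.1.toList) := by
  letI : Trans (fun p q : String × Int => p.1.toList < q.1.toList)
      (fun p q : String × Int => p.1.toList < q.1.toList)
      (fun p q : String × Int => p.1.toList < q.1.toList) := ⟨fun h1 h2 => h1.trans h2⟩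
  rw [← List.isChain_iff_pairwise]; exact pvTable_chain

-- where each element of pvAtoms sits inside pvTable
def pvPos : List Nat := [41, 42, 53, 10, 8, 15, 63, 72, 33, 67, 64, 59, 2, 97, 75, 92, 20, 4, 50, 16, 94, 106, 111, 24, 60, 34, 23, 69, 26, 116, 38, 40, 5, 95, 14, 51, 85, 100, 114, 117, 65, 61, 103, 91, 89, 78, 1, 17, 48, 99, 93, 104, 47, 113, 25, 9, 52, 18, 81, 66, 79, 98, 32, 39, 102, 29, 45, 30, 108, 115, 55, 43, 101, 112, 86, 74, 49, 82, 7, 44, 107, 77, 12, 80, 6, 90, 37, 84, 0, 105, 76, 110, 71, 83, 3, 21, 13, 19, 31, 36, 58, 70, 54, 87, 27, 96, 11, 46, 62, 28, 88, 22, 68, 35, 57, 56, 109, 73]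

set_option maxRecDepth 40000 in
theorem pvTable_covers : ∀ k ∈ List.range 118,
    pvTable[pvPos.getD k 0]? = some (pvAtoms.getD k "", (k : Int)) := by decide

-- each table entry points back into pvAtoms
set_option maxRecDepth 40000 in
theorem pvTable_back : ∀ j ∈ List.range 118,
    0 ≤ (pvTable.getD j ("", 0)).2 ∧
    pvAtoms[(pvTable.getD j ("", 0)).2.toNat]? = some (pvTable.getD j ("", 0)).1 := by decide

set_option maxRecDepth 40000 in
theorem pvAtoms_length : pvAtoms.length = 118 := by decide

set_option maxRecDepth 40000 in
theorem pvTable_len : pvTable.length = 118 := by decide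

-- distinct symbols: two table entries with the same symbol are the same entry
theorem pvTable_fst_inj (j k : Nat) (hj : j < pvTable.length) (hk : k < pvTable.length)
    (h : pvTable[j].1 = pvTable[k].1) : j = k := by
  rcases Nat.lt_trichotomy j k with hlt | heq | hgt
  · have := List.pairwise_iff_getElem.mp pvTable_sorted j k hj hk hlt
    rw [h] at this
    exact absurd this (lt_irrefl _)
  · exact heq
  · have := List.pairwise_iff_getElem.mp pvTable_sorted k j hk hj hgt
    rw [h] at this
    exact absurd this (lt_irrefl _)

-- hence pvAtoms itself has no duplicate symbols
theorem pvAtoms_nodup : pvAtoms.Nodup := by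
  rw [List.nodup_iff_getElem?_ne_getElem?]
  intro j k hjk hk hcon
  have hj118 : j < 118 := by rw [pvAtoms_length] at hk; omega
  have hk118 : k < 118 := by rw [pvAtoms_length] at hk; omega
  have hcj := pvTable_covers j (List.mem_range.mpr hj118)
  have hck := pvTable_covers k (List.mem_range.mpr hk118)
  have hj' : j < pvAtoms.length := by omega
  have hk' : k < pvAtoms.length := hk
  rw [List.getElem?_eq_getElem hj', List.getElem?_eq_getElem hk'] at hcon
  have hss : pvAtoms[j] = pvAtoms[k] := Option.some_inj.mp hcon
  have hgj : pvAtoms.getD j "" = pvAtoms[j] := List.getD_eq_getElem _ _ hj'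
  have hgk : pvAtoms.getD k "" = pvAtoms[k] := List.getD_eq_getElem _ _ hk'
  rcases List.getElem?_eq_some_iff.mp hcj with ⟨hpj, hej⟩
  rcases List.getElem?_eq_some_iff.mp hck with ⟨hpk, hek⟩
  have heqfst : pvTable[pvPos.getD j 0].1 = pvTable[pvPos.getD k 0].1 := by
    rw [hej, hek]
    simp only [hgj, hgk, hss]
  have hpe := pvTable_fst_inj _ _ hpj hpk heqfst
  rw [hpe] at hcj
  have h2 := Option.some_inj.mp (hcj.symm.trans hck)
  have : ((j : Int)) = (k : Int) := congrArg Prod.snd h2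
  omega

-- first index of an element of a duplicate-free list is its position
theorem index?_of_nodup_getElem? (l : List String) (hnd : l.Nodup) :
    ∀ (k : Nat) (a : String), l[k]? = some a → PySem.List.index? l a = some k := by
  induction l with
  | nil => intro k a h; simp at h
  | cons b t ih =>
    intro k a h
    rcases List.nodup_cons.mp hnd with ⟨hbt, hndt⟩
    cases k with
    | zero =>
      cases Option.some_inj.mp h
      exact PySem.List.index?_cons_self _ _
    | succ k =>
      rw [List.getElem?_cons_succ] at h
      have hat : a ∈ t := List.mem_of_getElem? h
      have hba : b ≠ a := fun hba => hbt (hba ▸ hat)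
      rw [PySem.List.index?_cons_of_ne t hba, ih hndt k a h]
      rfl

-- A's comprehension for a symbol absent from the scanned list is all zeros
theorem map_onehot_not_mem (x : String) (l : List String) (h : x ∉ l) :
    l.map (fun a => if x == a then (1 : Int) else 0) = List.replicate l.length 0 := by
  induction l with
  | nil => rfl
  | cons b t ih =>
    simp only [List.mem_cons, not_or] at h
    simp only [List.map_cons, List.length_cons, List.replicate_succ]
    rw [ih h.2]
    simp [beq_iff_eq, h.1]

-- A's comprehension for a present symbol is the zero vector with a 1 at its first index
theorem map_onehot_mem (x : String) (l : List String) (k : Nat)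
    (hnd : l.Nodup) (hidx : PySem.List.index? l x = some k) :
    l.map (fun a => if x == a then (1 : Int) else 0) = (List.replicate l.length 0).set k 1 := by
  induction l generalizing k with
  | nil => simp [PySem.List.index?] at hidx
  | cons b t ih =>
    rcases List.nodup_cons.mp hnd with ⟨hbt, hndt⟩
    by_cases hbx : b = x
    · subst hbx
      rw [PySem.List.index?_cons_self] at hidx
      cases hidx
      simp only [List.map_cons, List.length_cons, List.replicate_succ, List.set_cons_zero]
      rw [map_onehot_not_mem b t hbt]
      simp
    · rw [PySem.List.index?_cons_of_ne t hbx] at hidx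
      rcases Option.map_eq_some_iff.mp hidx with ⟨k', hk', rfl⟩
      simp only [List.map_cons, List.length_cons, List.replicate_succ, List.set_cons_succ]
      rw [ih k' hndt hk']
      have hxb : ¬x = b := fun h => hbx h.symm
      simp [beq_iff_eq, hxb]

-- atom_to_one_hot_alt with its let and match laid bare
theorem alt_eq (atom : String) : atom_to_one_hot_alt atom =
    match pvSearch atom 0 pvTable.length with
    | some i => PySem.List.pySetD (List.replicate 118 (0 : Int)) i 1
    | none => List.replicate 118 (0 : Int) := rfl

-- soundness of the search: a hit is a table entry carrying the atom
theorem pvSearchGo_sound (atom : String) :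
    ∀ (fuel lo hi : Nat) (i : Int), pvSearchGo atom fuel lo hi = some i →
    ∃ j, ∃ _hj : j < pvTable.length, pvTable[j] = (atom, i) := by
  intro fuel
  induction fuel with
  | zero => intro lo hi i h; simp [pvSearchGo] at h
  | succ n ih =>
    intro lo hi i h
    simp only [pvSearchGo] at h
    by_cases hlt : lo < hi
    · rw [if_pos hlt] at h
      cases hm : pvTable[(lo + hi) / 2]? with
      | none => simp only [hm] at h; exact absurd h (by simp)
      | some p =>
        simp only [hm] at h
        by_cases hc1 : atom.toList < p.1.toList
        · rw [if_pos hc1] at h; exact ih _ _ _ h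
        · rw [if_neg hc1] at h
          by_cases hc2 : p.1.toList < atom.toList
          · rw [if_pos hc2] at h; exact ih _ _ _ h
          · rw [if_neg hc2] at h
            have hp1 : p.1 = atom :=
              String.toList_inj.mp (le_antisymm (not_lt.mp hc1) (not_lt.mp hc2))
            rcases List.getElem?_eq_some_iff.mp hm with ⟨hj, hpj⟩
            cases Option.some_inj.mp h
            exact ⟨(lo + hi) / 2, hj, by rw [hpj, ← hp1]⟩
    · rw [if_neg hlt] at h; exact absurd h (by simp)

theorem pvSearch_sound (atom : String) (lo hi : Nat) (i : Int)
    (h : pvSearch atom lo hi = some i) :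
    ∃ j, ∃ _hj : j < pvTable.length, pvTable[j] = (atom, i) :=
  pvSearchGo_sound atom (hi - lo) lo hi i h

-- completeness: if some entry in the live interval carries the atom and the fuel
-- covers the interval, the search returns a hit
theorem pvSearchGo_complete (atom : String) :
    ∀ n lo hi, hi - lo ≤ n → hi ≤ pvTable.length →
    ∀ j, ∀ _hj : j < pvTable.length, lo ≤ j → j < hi → pvTable[j].1 = atom →
    (pvSearchGo atom n lo hi).isSome := by
  have hmono : ∀ (a b : Nat) (ha : a < pvTable.length) (hb : b < pvTable.length),
      a < b → pvTable[a].1.toList < pvTable[b].1.toList :=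
    fun a b ha hb hab => List.pairwise_iff_getElem.mp pvTable_sorted a b ha hb hab
  intro n
  induction n with
  | zero =>
    intro lo hi hfuel _ j hj hlo hjh _
    omega
  | succ n ih =>
    intro lo hi hfuel hhi j hj hlo hjh hatom
    have hlt : lo < hi := by omega
    have hmid_lt : (lo + hi) / 2 < pvTable.length := by omega
    simp only [pvSearchGo]
    rw [if_pos hlt, List.getElem?_eq_getElem hmid_lt]
    by_cases hc1 : atom.toList < pvTable[(lo + hi) / 2].1.toList
    · simp only [if_pos hc1]
      have hjm : j < (lo + hi) / 2 := by
        rcases Nat.lt_or_ge j ((lo + hi) / 2) with h | h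
        · exact h
        · rcases Nat.eq_or_lt_of_le h with h | h
          · simp only [h, hatom] at hc1
            exact absurd hc1 (lt_irrefl _)
          · have hm2 := hmono _ _ hmid_lt hj h
            rw [hatom] at hm2
            exact absurd (hc1.trans hm2) (lt_irrefl _)
      exact ih lo ((lo + hi) / 2) (by omega) (by omega) j hj hlo hjm hatom
    · simp only [if_neg hc1]
      by_cases hc2 : pvTable[(lo + hi) / 2].1.toList < atom.toList
      · simp only [if_pos hc2]
        have hjm : (lo + hi) / 2 + 1 ≤ j := by
          rcases Nat.lt_or_ge ((lo + hi) / 2) j with h | h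
          · omega
          · rcases Nat.eq_or_lt_of_le h with h | h
            · simp only [← h, hatom] at hc2
              exact absurd hc2 (lt_irrefl _)
            · have hm2 := hmono _ _ hj hmid_lt h
              rw [hatom] at hm2
              exact absurd (hm2.trans hc2) (lt_irrefl _)
        exact ih ((lo + hi) / 2 + 1) hi (by omega) hhi j hj hjm hjh hatom
      · simp [if_neg hc2]

theorem pvSearch_complete (atom : String) (lo hi : Nat) (hhi : hi ≤ pvTable.length)
    (j : Nat) (hj : j < pvTable.length) (hlo : lo ≤ j) (hjh : j < hi)
    (hatom : pvTable[j].1 = atom) : (pvSearch atom lo hi).isSome :=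
  pvSearchGo_complete atom (hi - lo) lo hi (le_refl _) hhi j hj hlo hjh hatom

-- ===== VERDICT (by name: the statement is the Claim_ definition above) =====
theorem atom_to_one_hot_spec : Claim_equal_atom_to_one_hot := by
  intro atom _
  unfold Spec_atom_to_one_hot atom_to_one_hot
  rw [alt_eq]
  by_cases hmem : atom ∈ pvAtoms
  · -- the atom is a known symbol: the search hits its table entry
    rcases List.mem_iff_getElem.mp hmem with ⟨k, hk, hak⟩
    have hk118 : k < 118 := by rw [pvAtoms_length] at hk; omega
    have hc := pvTable_covers k (List.mem_range.mpr hk118)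
    rcases List.getElem?_eq_some_iff.mp hc with ⟨hpk, hek⟩
    have hek1 : pvTable[pvPos.getD k 0].1 = atom := by
      rw [hek]
      simp only [List.getD_eq_getElem _ _ hk, hak]
    have hsome : (pvSearch atom 0 pvTable.length).isSome :=
      pvSearch_complete atom 0 pvTable.length (le_refl _) _ hpk (Nat.zero_le _) hpk hek1
    rcases Option.isSome_iff_exists.mp hsome with ⟨i, hi⟩
    rcases pvSearch_sound atom 0 pvTable.length i hi with ⟨j, hj, hpj⟩
    have hj118 : j < 118 := by rw [pvTable_len] at hj; omega
    have hb := pvTable_back j (List.mem_range.mpr hj118)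
    rw [List.getD_eq_getElem _ _ hj, hpj] at hb
    have hidx : PySem.List.index? pvAtoms atom = some i.toNat :=
      index?_of_nodup_getElem? pvAtoms pvAtoms_nodup i.toNat atom hb.2
    simp only [hi]
    rw [map_onehot_mem atom pvAtoms i.toNat pvAtoms_nodup hidx,
        PySem.List.pySetD_of_nonneg _ _ hb.1, pvAtoms_length]
  · -- unknown symbol: the search misses and both sides are all zeros
    have hnone : pvSearch atom 0 pvTable.length = none := by
      cases hs : pvSearch atom 0 pvTable.length with
      | none => rfl
      | some i =>
        rcases pvSearch_sound atom 0 pvTable.length i hs with ⟨j, hj, hpj⟩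
        have hj118 : j < 118 := by rw [pvTable_len] at hj; omega
        have hb := pvTable_back j (List.mem_range.mpr hj118)
        rw [List.getD_eq_getElem _ _ hj, hpj] at hb
        exact absurd (List.mem_of_getElem? hb.2) hmem
    simp only [hnone]
    rw [map_onehot_not_mem atom pvAtoms hmem, pvAtoms_length]
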